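-- pv_equiv track=rewrite | github.com/ICAERUS-EU/Olive-Tree-Detection | utils.py | check_first_value_consistency
-- ===== SOURCE A (Python) =====
-- def check_first_value_consistency(boxes):
--     if not boxes:
--         return False
--     first_value = boxes[0][0]
--     for box in boxes:
--         if box[0] != first_value:
--             return False
--     return True
-- ===== SOURCE B (Python) =====
-- def check_first_value_consistency(boxes):
--     return len(boxes) > 0 and len({box[0] for box in boxes}) == 1
-- ===== Notes on version B (the rewrite author's own statement) =====
-- stated objective: idiomatic
-- what changed: Replaces the reference-value mismatch scan with building the set of distinct first values and testing that it has exactly one element.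
-- outside the precondition, e.g. on check_first_value_consistency([[1], [2], []]): A returns False, B raises IndexError
import Mathlib
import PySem

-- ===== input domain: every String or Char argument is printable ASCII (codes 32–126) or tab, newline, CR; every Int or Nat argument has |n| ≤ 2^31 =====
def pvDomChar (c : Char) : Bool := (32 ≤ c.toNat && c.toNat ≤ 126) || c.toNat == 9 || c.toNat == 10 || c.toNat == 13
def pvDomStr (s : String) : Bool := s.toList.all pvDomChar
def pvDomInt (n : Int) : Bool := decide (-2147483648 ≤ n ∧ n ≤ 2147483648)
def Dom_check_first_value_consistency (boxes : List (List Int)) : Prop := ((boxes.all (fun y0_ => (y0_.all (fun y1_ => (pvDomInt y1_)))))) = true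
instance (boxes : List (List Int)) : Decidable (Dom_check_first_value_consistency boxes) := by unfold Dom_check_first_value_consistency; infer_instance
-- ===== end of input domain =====

-- B is an idiomatic re-implementation: set of distinct first values, cardinality test; same cost.
-- ===== PORT A =====
def pvLoopA (fv : Int) : List (List Int) → Bool
  | [] => true
  | b :: rest =>
    match PySem.List.pyGet? b 0 with
    | none => false        -- box[0] raises IndexError; outside Pre_
    | some v => if v ≠ fv then false else pvLoopA fv rest

def check_first_value_consistency (boxes : List (List Int)) : Bool :=
  match boxes with
  | [] => false
  | b0 :: _ =>
    match PySem.List.pyGet? b0 0 with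
    | none => false        -- boxes[0][0] raises IndexError; outside Pre_
    | some fv => pvLoopA fv boxes

-- ===== PORT B =====
def check_first_value_consistency_alt (boxes : List (List Int)) : Bool :=
  decide (boxes.length > 0) &&
    ((PySem.Set.ofList (boxes.map (fun b => PySem.List.pyGet? b 0))).length == 1)

-- ===== PRECONDITION & SPEC =====
-- Pre_ excludes inputs containing an empty box: on most of them A raises IndexError
-- (boxes[0][0] or box[0]); on those where a mismatch precedes the empty box A returns
-- False while B's set comprehension raises IndexError, so no value is claimed there.
def Pre_check_first_value_consistency (boxes : List (List Int)) : Prop :=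
  ∀ b ∈ boxes, b ≠ []
instance (boxes : List (List Int)) : Decidable (Pre_check_first_value_consistency boxes) := by
  unfold Pre_check_first_value_consistency; infer_instance
def pvWitness_check_first_value_consistency : List (List Int) := [[1, 2], [1], [1, 3]]

def Spec_check_first_value_consistency (boxes : List (List Int)) (out : Bool) : Prop := out = check_first_value_consistency_alt boxes
instance (boxes : List (List Int)) (out : Bool) : Decidable (Spec_check_first_value_consistency boxes out) := by unfold Spec_check_first_value_consistency; infer_instance

-- ===== CLAIM (what is proved, stated in full; the proofs are below) =====
def Claim_equal_check_first_value_consistency : Prop := ∀ (boxes : List (List Int)), Dom_check_first_value_consistency boxes → Pre_check_first_value_consistency boxes → Spec_check_first_value_consistency boxes (check_first_value_consistency boxes)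

-- ===== LEMMAS AND PROOFS =====

-- ===== VERDICT (by name: the statement is the Claim_ definition above) =====
-- loop A returns true iff every box's first element is fv
theorem pvLoopA_true_iff (fv : Int) (l : List (List Int)) :
    pvLoopA fv l = true ↔ ∀ b ∈ l, PySem.List.pyGet? b 0 = some fv := by
  induction l with
  | nil => simp [pvLoopA]
  | cons b rest ih =>
    simp only [pvLoopA]
    cases h : PySem.List.pyGet? b 0 with
    | none => simp [h]
    | some v =>
      by_cases hv : v = fv
      · subst hv; simp [h, ih]
      · simp [h, hv]

theorem pv_foldl_add_fixed {α : Type} [BEq α] [LawfulBEq α] (l : List α) (s : PySem.Set α)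
    (h : ∀ x ∈ l, x ∈ s) : l.foldl PySem.Set.add s = s := by
  induction l with
  | nil => rfl
  | cons x xs ih =>
    have hx : PySem.Set.add s x = s := by
      simp only [PySem.Set.add, PySem.Set.contains]
      simp [h x (by simp)]
    simp only [List.foldl_cons, hx]
    exact ih (fun y hy => h y (by simp [hy]))

theorem pv_ofList_const {α : Type} [BEq α] [LawfulBEq α] (a : α) (l : List α)
    (h : ∀ x ∈ l, x = a) : PySem.Set.ofList (a :: l) = [a] := by
  have : PySem.Set.ofList (a :: l) = l.foldl PySem.Set.add (PySem.Set.add PySem.Set.empty a) := by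
    rw [PySem.Set.ofList_eq_foldl]; rfl
  rw [this]
  have ha : PySem.Set.add PySem.Set.empty a = [a] := by rfl
  rw [ha]
  exact pv_foldl_add_fixed l [a] (fun x hx => by simp [h x hx])

-- ===== VERDICT (by name: the statement is the Claim_ definition above) =====
theorem check_first_value_consistency_spec : Claim_equal_check_first_value_consistency := by
  intro boxes _ hpre
  unfold Spec_check_first_value_consistency
  cases boxes with
  | nil => rfl
  | cons b0 rest =>
    have hb0 : b0 ≠ [] := hpre b0 (by simp)
    obtain ⟨x, xs, hx⟩ := List.exists_cons_of_ne_nil hb0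
    have hget : PySem.List.pyGet? b0 0 = some x := by
      subst hx; simp [PySem.List.pyGet?, PySem.List.pyIdx?]
    simp only [check_first_value_consistency, check_first_value_consistency_alt, hget]
    symm
    rw [Bool.eq_iff_iff]
    rw [pvLoopA_true_iff]
    constructor
    · intro h
      have h1 : ((PySem.Set.ofList ((b0 :: rest).map (fun b => PySem.List.pyGet? b 0))).length == 1) = true := by
        simpa using h
      have h1' : (PySem.Set.ofList ((b0 :: rest).map (fun b => PySem.List.pyGet? b 0))).length = 1 := by
        simpa using h1
      obtain ⟨c, hc⟩ := List.length_eq_one_iff.mp h1'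
      intro b hb
      have hmem : PySem.List.pyGet? b 0 ∈ PySem.Set.ofList ((b0 :: rest).map (fun b => PySem.List.pyGet? b 0)) :=
        (PySem.Set.mem_ofList _ _).mpr (List.mem_map_of_mem hb)
      have hmem0 : PySem.List.pyGet? b0 0 ∈ PySem.Set.ofList ((b0 :: rest).map (fun b => PySem.List.pyGet? b 0)) :=
        (PySem.Set.mem_ofList _ _).mpr (List.mem_map_of_mem (by simp))
      rw [hc] at hmem hmem0
      simp at hmem hmem0
      rw [hmem, ← hmem0, hget]
    · intro h
      have hmap : (b0 :: rest).map (fun b => PySem.List.pyGet? b 0)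
          = some x :: rest.map (fun b => PySem.List.pyGet? b 0) := by
        simp [hget]
      have hall : ∀ y ∈ rest.map (fun b => PySem.List.pyGet? b 0), y = some x := by
        intro y hy
        obtain ⟨b, hb, rfl⟩ := List.mem_map.mp hy
        exact h b (by simp [hb])
      rw [hmap, pv_ofList_const (some x) _ hall]
      simp
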